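-- pv_equiv track=rewrite | github.com/OuchiniKaeru/nami_desktop | src/core/context/context_management/thread_loader.py | _neutralize_invalid_unicode_escapes_in_strings
-- ===== SOURCE A (Python) =====
-- def _neutralize_invalid_unicode_escapes_in_strings(text: str) -> str:
--     """
--     文字列中の無効な \\u エスケープ(4桁の16進数が続かない)を無害化する。
--     無効な "\\u" を "\\\\u" に変換し、JSONパーサにリテラルとして扱わせる。
--     """
--     result_chars: list[str] = []
--     in_string = False
--     escape = False
--     i = 0
--     n = len(text)
--     while i < n:
--         ch = text[i]
--         result_chars.append(ch)
--         if in_string: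
--             if escape:
--                 escape = False
--             else:
--                 if ch == '\\':
--                     # 直後が 'u' で、かつ 4桁のHEXが揃っていなければ "\\u" にする
--                     if i + 1 < n and text[i + 1] == 'u':
--                         hex_ok = False
--                         if i + 5 < n:
--                             hex_part = text[i + 2:i + 6]
--                             hex_ok = all(c in '0123456789abcdefABCDEF' for c in hex_part)
--                         if not hex_ok:
--                             # 直前に追加した '\\' をもう一つ追加して "\\\\u" にする
--                             result_chars.append('\\')
--                     escape = True
--                 elif ch == '"':
--                     in_string = False
--         else:
--             if ch == '"':
--                 in_string = True
--                 escape = False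
--         i += 1
--     return ''.join(result_chars)
-- ===== SOURCE B (Python) =====
-- HEX_DIGITS = '0123456789abcdefABCDEF'
--
--
-- def _neutralize_invalid_unicode_escapes_in_strings(text: str) -> str:
--     """Two-phase scanner: skip text outside string literals verbatim; inside a
--     string literal consume backslash-escape PAIRS as units (no escape flag),
--     doubling a '\\u' that is not followed by exactly four hex digits."""
--     n = len(text)
--     out = []
--     i = 0
--     while i < n:
--         # outside a string literal: copy up to and including the next quote
--         ch = text[i]
--         out.append(ch)
--         i += 1
--         if ch != '"':
--             continue
--         # inside a string literal: escapes are consumed two characters at a time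
--         while i < n:
--             c = text[i]
--             if c == '"':
--                 out.append(c)
--                 i += 1
--                 break
--             if c == '\\':
--                 if i + 1 < n:
--                     nxt = text[i + 1]
--                     if nxt == 'u' and not (i + 6 <= n and all(h in HEX_DIGITS for h in text[i + 2:i + 6])):
--                         out.append('\\\\u')
--                     else:
--                         out.append('\\' + nxt)
--                     i += 2
--                 else:
--                     out.append('\\')
--                     i += 1
--             else:
--                 out.append(c)
--                 i += 1
--     return ''.join(out)
-- ===== Notes on version B (the rewrite author's own statement) =====
-- stated objective: alternative
-- what changed: Replaces A's single per-character state machine with in_string/escape boolean flags by a two-mode scanner that copies non-string text verbatim and, inside string literals, consumes backslash-escape pairs as two-character units, eliminating both state flags.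
import Mathlib
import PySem

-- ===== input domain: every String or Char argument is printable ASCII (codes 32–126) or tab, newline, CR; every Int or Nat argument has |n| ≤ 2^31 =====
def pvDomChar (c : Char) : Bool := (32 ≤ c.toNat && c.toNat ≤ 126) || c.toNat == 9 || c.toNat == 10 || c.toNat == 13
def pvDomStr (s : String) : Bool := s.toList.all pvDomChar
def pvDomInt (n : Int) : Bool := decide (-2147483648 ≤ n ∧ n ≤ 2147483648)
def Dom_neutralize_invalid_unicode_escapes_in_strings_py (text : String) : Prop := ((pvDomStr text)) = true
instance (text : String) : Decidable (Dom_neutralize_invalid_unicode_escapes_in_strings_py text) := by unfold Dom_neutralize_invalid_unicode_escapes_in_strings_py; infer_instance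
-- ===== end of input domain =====

-- B replaces A's per-character state machine (in_string/escape flags) by a two-mode
-- scanner: text outside string literals is copied verbatim, and inside a literal
-- escape PAIRS are consumed as units (objective: alternative structure, same cost).

-- ===== PORT A =====
-- membership test `c in '0123456789abcdefABCDEF'` (exact on ASCII)
def pvIsHex (c : Char) : Bool := ("0123456789abcdefABCDEF".toList).contains c

-- A's while loop over i with state (in_string, escape), as the obvious structural
-- recursion over the remaining characters; `text[i+1]` / `i+5 < n` / the slice
-- `text[i+2:i+6]` become pattern matches on the tail (exact: forward in-range access).
def pvGoA : List Char → Bool → Bool → List Char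
  | [], _, _ => []
  | ch :: tl, in_string, escape =>
    if in_string then
      if escape then ch :: pvGoA tl true false
      else if ch = '\\' then
        let extra : List Char :=
          match tl with
          | [] => []                      -- i + 1 < n fails
          | nxt :: tl2 =>
            if nxt = 'u' then
              -- hex_ok: i + 5 < n and all four slice chars are hex digits
              if (match tl2 with
                  | h1 :: h2 :: h3 :: h4 :: _ =>
                      pvIsHex h1 && pvIsHex h2 && pvIsHex h3 && pvIsHex h4
                  | _ => false)
              then [] else ['\\']
            else []
        (ch :: extra) ++ pvGoA tl true true
      else if ch = '"' then ch :: pvGoA tl false escape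
      else ch :: pvGoA tl true escape
    else
      if ch = '"' then ch :: pvGoA tl true false
      else ch :: pvGoA tl false escape

def neutralize_invalid_unicode_escapes_in_strings_py (text : String) : String :=
  String.ofList (pvGoA text.toList false false)

-- ===== PORT B =====
-- `i + 6 <= n and all(h in HEX_DIGITS for h in text[i+2:i+6])`
def pvHex4 : List Char → Bool
  | h1 :: h2 :: h3 :: h4 :: _ => pvIsHex h1 && pvIsHex h2 && pvIsHex h3 && pvIsHex h4
  | _ => false

mutual
-- outer loop body: outside a string literal, copy chars; a quote enters a literal
def pvGoOut : List Char → List Char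
  | [] => []
  | ch :: tl => if ch = '"' then ch :: pvGoIn tl else ch :: pvGoOut tl

-- inner loop: inside a string literal, consume escape pairs as units
def pvGoIn : List Char → List Char
  | [] => []
  | c :: tl =>
    if c = '"' then c :: pvGoOut tl
    else if c = '\\' then
      match tl with
      | [] => ['\\']
      | nxt :: tl2 =>
        if nxt = 'u' && !pvHex4 tl2 then '\\' :: '\\' :: 'u' :: pvGoIn tl2
        else '\\' :: nxt :: pvGoIn tl2
    else c :: pvGoIn tl
end

def neutralize_invalid_unicode_escapes_in_strings_py_alt (text : String) : String :=
  String.ofList (pvGoOut text.toList)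

-- ===== PRECONDITION & SPEC =====
def Spec_neutralize_invalid_unicode_escapes_in_strings_py (text : String) (out : String) : Prop := out = neutralize_invalid_unicode_escapes_in_strings_py_alt text
instance (text : String) (out : String) : Decidable (Spec_neutralize_invalid_unicode_escapes_in_strings_py text out) := by unfold Spec_neutralize_invalid_unicode_escapes_in_strings_py; infer_instance

-- ===== CLAIM (what is proved, stated in full; the proofs are below) =====
def Claim_equal_neutralize_invalid_unicode_escapes_in_strings_py : Prop := ∀ (text : String), Dom_neutralize_invalid_unicode_escapes_in_strings_py text → Spec_neutralize_invalid_unicode_escapes_in_strings_py text (neutralize_invalid_unicode_escapes_in_strings_py text)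

-- ===== LEMMAS AND PROOFS =====

-- joint loop invariant: A's scan outside a string equals pvGoOut (for any leftover
-- escape flag), and A's scan inside a string with escape cleared equals pvGoIn;
-- by strong induction on the length of the remaining input.
theorem pvGo_eq (N : Nat) : ∀ (l : List Char), l.length ≤ N →
    ((∀ e, pvGoA l false e = pvGoOut l) ∧ pvGoA l true false = pvGoIn l) := by
  induction N with
  | zero =>
    intro l hl
    have : l = [] := List.eq_nil_of_length_eq_zero (Nat.le_zero.mp hl)
    subst this
    exact ⟨fun _ => rfl, rfl⟩
  | succ N ih =>
    intro l hl
    match l with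
    | [] => exact ⟨fun _ => rfl, rfl⟩
    | ch :: tl =>
      have htl : tl.length ≤ N := by simp at hl; omega
      constructor
      · intro e
        rw [pvGoOut.eq_def]
        by_cases hq : ch = '"'
        · subst hq
          show '"' :: pvGoA tl true false = _
          simp [(ih tl htl).2]
        · show (if ch = '"' then ch :: pvGoA tl true false else ch :: pvGoA tl false e) = _
          simp [hq, (ih tl htl).1 e]
      · rw [pvGoIn.eq_def]
        by_cases hq : ch = '"'
        · subst hq
          show '"' :: pvGoA tl false false = _
          simp [(ih tl htl).1 false]
        · by_cases hb : ch = '\\'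
          · subst hb
            match tl with
            | [] => rfl
            | nxt :: tl2 =>
              have htl2 : tl2.length ≤ N := by simp at hl; omega
              have hrec : pvGoA tl2 true false = pvGoIn tl2 := (ih tl2 htl2).2
              by_cases hu : nxt = 'u'
              · subst hu
                match tl2 with
                | h1 :: h2 :: h3 :: h4 :: rest =>
                  show '\\' :: ((if pvIsHex h1 && pvIsHex h2 && pvIsHex h3 && pvIsHex h4
                        then [] else ['\\']) ++ 'u' :: pvGoA (h1::h2::h3::h4::rest) true false) = _
                  by_cases hh : (pvIsHex h1 && pvIsHex h2 && pvIsHex h3 && pvIsHex h4) = true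
                  · simp [pvHex4, hh, hrec]
                  · simp [pvHex4, hh, hrec]
                | [] =>
                  show '\\' :: (['\\'] ++ 'u' :: pvGoA [] true false) = _
                  simp [pvHex4, hrec]
                | [h1] =>
                  show '\\' :: (['\\'] ++ 'u' :: pvGoA [h1] true false) = _
                  simp [pvHex4, hrec]
                | [h1, h2] =>
                  show '\\' :: (['\\'] ++ 'u' :: pvGoA [h1, h2] true false) = _
                  simp [pvHex4, hrec]
                | [h1, h2, h3] =>
                  show '\\' :: (['\\'] ++ 'u' :: pvGoA [h1, h2, h3] true false) = _
                  simp [pvHex4, hrec]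
              · show '\\' :: ((if nxt = 'u' then _ else []) ++ nxt :: pvGoA tl2 true false) = _
                simp [hu, hrec]
          · show (if ch = '\\' then _
                  else if ch = '"' then ch :: pvGoA tl false false else ch :: pvGoA tl true false) = _
            simp [hq, hb, (ih tl htl).2]

-- ===== VERDICT (by name: the statement is the Claim_ definition above) =====
theorem neutralize_invalid_unicode_escapes_in_strings_py_spec : Claim_equal_neutralize_invalid_unicode_escapes_in_strings_py := by
  intro text _
  unfold Spec_neutralize_invalid_unicode_escapes_in_strings_py
  unfold neutralize_invalid_unicode_escapes_in_strings_py neutralize_invalid_unicode_escapes_in_strings_py_alt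
  exact congrArg _ ((pvGo_eq text.toList.length text.toList le_rfl).1 false)
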